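-- pv_equiv track=rewrite | github.com/tendlyeu/soco | pages/1_Chat_History.py | group_logs_by_session
-- ===== SOURCE A (Python) =====
-- from collections import defaultdict
--
-- def group_logs_by_session(logs):
--     """Group logs by session ID."""
--     sessions = defaultdict(list)
--     for log in logs:
--         session_id = log.get('session_id', 'unknown')
--         sessions[session_id].append(log)
--
--     # Sort each session's logs by timestamp
--     for session_id in sessions:
--         sessions[session_id].sort(key=lambda x: x.get('timestamp', ''))
--
--     return dict(sessions)
-- ===== SOURCE B (Python) =====
-- def group_logs_by_session(logs):
--     """Group logs by session ID."""
--     # Create buckets in first-appearance order of session ids,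
--     # then distribute logs from ONE stable global sort by timestamp.
--     order = dict.fromkeys(log.get('session_id', 'unknown') for log in logs)
--     buckets = {sid: [] for sid in order}
--     for log in sorted(logs, key=lambda x: x.get('timestamp', '')):
--         buckets[log.get('session_id', 'unknown')].append(log)
--     return buckets
-- ===== Notes on version B (the rewrite author's own statement) =====
-- stated objective: alternative
-- what changed: Instead of grouping first and then sorting every bucket separately, B does one stable global sort of all logs by timestamp and distributes them in a single pass into buckets pre-created in first-appearance order of session id; stability makes each bucket come out in the same order A produces.
import Mathlib
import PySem

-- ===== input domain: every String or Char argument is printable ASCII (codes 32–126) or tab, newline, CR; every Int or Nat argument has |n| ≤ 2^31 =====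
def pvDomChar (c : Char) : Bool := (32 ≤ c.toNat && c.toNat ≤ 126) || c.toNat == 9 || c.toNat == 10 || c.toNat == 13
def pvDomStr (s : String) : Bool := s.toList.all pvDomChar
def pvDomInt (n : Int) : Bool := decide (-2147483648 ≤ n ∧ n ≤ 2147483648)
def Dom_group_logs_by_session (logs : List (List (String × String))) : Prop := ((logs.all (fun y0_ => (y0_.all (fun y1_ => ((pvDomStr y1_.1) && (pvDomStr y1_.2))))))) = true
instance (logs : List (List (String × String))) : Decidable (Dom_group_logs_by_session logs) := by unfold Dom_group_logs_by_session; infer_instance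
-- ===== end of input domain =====

-- ===== PORT A =====
-- B groups from one stable global sort by timestamp instead of sorting each bucket (alternative decomposition, same observable result).
-- log.get(k, dflt) on a Python dict (assoc list, first match wins)
def pyDictGet (log : List (String × String)) (k dflt : String) : String :=
  (PySem.Dict.mk log).getD k dflt

def group_logs_by_session (logs : List (List (String × String))) : List (String × List (List (String × String))) :=
  let sessions := logs.foldl
    (fun d log => d.modify (pyDictGet log "session_id" "unknown") [] (fun v => v ++ [log]))
    PySem.Dict.empty
  let sessions := sessions.keys.foldl
    (fun d sid => d.modify sid [] (fun v => PySem.List.sorted v (fun x => pyDictGet x "timestamp" "")))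
    sessions
  sessions.items

-- ===== PORT B =====
def group_logs_by_session_alt (logs : List (List (String × String))) : List (String × List (List (String × String))) :=
  let order := PySem.List.dedup (logs.map (fun log => pyDictGet log "session_id" "unknown"))
  let buckets := order.foldl (fun d sid => d.insert sid []) PySem.Dict.empty
  let buckets := (PySem.List.sorted logs (fun x => pyDictGet x "timestamp" "")).foldl
    (fun d log => d.modify (pyDictGet log "session_id" "unknown") [] (fun v => v ++ [log]))
    buckets
  buckets.items

-- ===== PRECONDITION & SPEC =====
def Spec_group_logs_by_session (logs : List (List (String × String))) (out : List (String × List (List (String × String)))) : Prop := out = group_logs_by_session_alt logs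
instance (logs : List (List (String × String))) (out : List (String × List (List (String × String)))) : Decidable (Spec_group_logs_by_session logs out) := by unfold Spec_group_logs_by_session; infer_instance

-- ===== CLAIM (what is proved, stated in full; the proofs are below) =====
def Claim_equal_group_logs_by_session : Prop := ∀ (logs : List (List (String × String))), Dom_group_logs_by_session logs → Spec_group_logs_by_session logs (group_logs_by_session logs)

-- ===== LEMMAS AND PROOFS =====

-- insertBy puts x before the first y with key x < key y; on a sorted list, filtering commutes with it.
theorem insertBy_front {α : Type} (bf : α → α → Bool) (x : α) (ys : List α)
    (h : ∀ y ∈ ys.head?, bf x y = true) : PySem.List.insertBy bf x ys = x :: ys := by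
  cases ys with
  | nil => rfl
  | cons y ys => simp [PySem.List.insertBy, h y rfl]

theorem pairwise_insertBy {α : Type} (key : α → String) (x : α) (ys : List α)
    (h : ys.Pairwise (fun a b => key a ≤ key b)) :
    (PySem.List.insertBy (fun a b => decide (key a < key b)) x ys).Pairwise (fun a b => key a ≤ key b) := by
  induction ys with
  | nil => simp [PySem.List.insertBy]
  | cons y ys ih =>
    rw [List.pairwise_cons] at h
    by_cases hxy : key x < key y
    · rw [show PySem.List.insertBy (fun a b => decide (key a < key b)) x (y :: ys) = x :: y :: ys by
        simp [PySem.List.insertBy, hxy]]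
      refine List.Pairwise.cons ?_ (List.Pairwise.cons h.1 h.2)
      intro z hz
      rcases List.mem_cons.mp hz with rfl | hz
      · exact le_of_lt hxy
      · exact le_trans (le_of_lt hxy) (h.1 z hz)
    · rw [show PySem.List.insertBy (fun a b => decide (key a < key b)) x (y :: ys)
          = y :: PySem.List.insertBy (fun a b => decide (key a < key b)) x ys by
        simp [PySem.List.insertBy, hxy]]
      refine List.Pairwise.cons ?_ (ih h.2)
      intro z hz
      rw [PySem.List.mem_insertBy] at hz
      rcases hz with rfl | hz
      · exact le_of_not_gt hxy
      · exact h.1 z hz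

theorem filter_insertBy {α : Type} (key : α → String) (p : α → Bool) (x : α) (ys : List α)
    (h : ys.Pairwise (fun a b => key a ≤ key b)) :
    (PySem.List.insertBy (fun a b => decide (key a < key b)) x ys).filter p
      = if p x then PySem.List.insertBy (fun a b => decide (key a < key b)) x (ys.filter p)
        else ys.filter p := by
  induction ys with
  | nil => cases hpx : p x <;> simp [PySem.List.insertBy, hpx]
  | cons y ys ih =>
    rw [List.pairwise_cons] at h
    by_cases hxy : key x < key y
    · rw [show PySem.List.insertBy (fun a b => decide (key a < key b)) x (y :: ys) = x :: y :: ys by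
        simp [PySem.List.insertBy, hxy]]
      cases hpx : p x with
      | false => simp [List.filter_cons, hpx]
      | true =>
        have hall : ∀ z ∈ List.filter p (y :: ys), key x < key z := by
          intro z hz
          rcases List.mem_cons.mp (List.mem_filter.mp hz).1 with rfl | hz'
          · exact hxy
          · exact lt_of_lt_of_le hxy (h.1 z hz')
        have hfront : PySem.List.insertBy (fun a b => decide (key a < key b)) x (List.filter p (y :: ys))
            = x :: List.filter p (y :: ys) := by
          apply insertBy_front
          intro z hz
          simpa using hall z (List.mem_of_mem_head? hz)
        rw [if_pos rfl, hfront, List.filter_cons]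
        simp [hpx]
    · have hstep : PySem.List.insertBy (fun a b => decide (key a < key b)) x (y :: ys)
          = y :: PySem.List.insertBy (fun a b => decide (key a < key b)) x ys := by
        simp [PySem.List.insertBy, hxy]
      have hstep2 : PySem.List.insertBy (fun a b => decide (key a < key b)) x (y :: ys.filter p)
          = y :: PySem.List.insertBy (fun a b => decide (key a < key b)) x (ys.filter p) := by
        simp [PySem.List.insertBy, hxy]
      rw [hstep, List.filter_cons, List.filter_cons, ih h.2]
      cases hpy : p y <;> cases hpx : p x <;>
        simp only [hstep2, Bool.false_eq_true, if_true, if_false]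

theorem filter_foldl_insertBy {α : Type} (key : α → String) (p : α → Bool) (xs : List α) :
    ∀ acc : List α, acc.Pairwise (fun a b => key a ≤ key b) →
    (xs.foldl (fun acc x => PySem.List.insertBy (fun a b => decide (key a < key b)) x acc) acc).filter p
      = (xs.filter p).foldl (fun acc x => PySem.List.insertBy (fun a b => decide (key a < key b)) x acc) (acc.filter p) := by
  induction xs with
  | nil => intro acc _; rfl
  | cons x xs ih =>
    intro acc hacc
    simp only [List.foldl_cons, List.filter_cons]
    rw [ih _ (pairwise_insertBy key x acc hacc), filter_insertBy key p x acc hacc]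
    cases hpx : p x <;> simp

-- stability of Python's sort: filtering a stable sort = sorting the filtered list
theorem filter_sorted {α : Type} (key : α → String) (p : α → Bool) (xs : List α) :
    (PySem.List.sorted xs key).filter p = PySem.List.sorted (xs.filter p) key := by
  rw [PySem.List.sorted_eq_foldl_insertBy, PySem.List.sorted_eq_foldl_insertBy]
  simpa using filter_foldl_insertBy key p xs [] (by simp)

-- a modify-loop over a Nodup key list touches each key exactly once
theorem getD_foldl_modify_once {ν : Type} (f : List ν → List ν) (ks : List String)
    (hnd : ks.Nodup) (d : PySem.Dict String (List ν)) (k : String) :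
    ((ks.foldl (fun d k => d.modify k [] f) d).getD k [])
      = if k ∈ ks then f (d.getD k []) else d.getD k [] := by
  induction ks generalizing d with
  | nil => simp
  | cons a ks ih =>
    rw [List.nodup_cons] at hnd
    simp only [List.foldl_cons, ih hnd.2, PySem.Dict.getD_modify]
    by_cases hk : k = a
    · subst hk
      simp [hnd.1]
    · simp [hk]

theorem set_update_of_subset (s : PySem.Set String) (xs : List String)
    (h : ∀ x ∈ xs, x ∈ s) : PySem.Set.update s xs = s := by
  rw [PySem.Set.update_eq_append_filter]
  have hnil : List.filter (fun y => !s.contains y) (PySem.Set.ofList xs) = [] := by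
    rw [List.filter_eq_nil_iff]
    intro y hy
    have hys : y ∈ s := h y ((PySem.Set.mem_ofList xs y).mp hy)
    simpa [PySem.Set.contains_iff] using hys
  rw [hnil, List.append_nil]

-- grouping fold, rephrased through key/value pairs so getD_foldl_modify_append applies
theorem getD_group {α : Type} (keyf : α → String) (l : List α) (d : PySem.Dict String (List α)) (k : String) :
    ((l.foldl (fun d x => d.modify (keyf x) [] (fun v => v ++ [x])) d).getD k [])
      = d.getD k [] ++ l.filter (fun x => keyf x == k) := by
  have h := PySem.Dict.getD_foldl_modify_append (l.map (fun x => (keyf x, x))) d k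
  rw [List.foldl_map] at h
  simpa [List.filter_map, Function.comp_def, List.map_map] using h

-- the generic core: group-then-sort-each-bucket = pre-create-buckets-then-distribute-the-globally-sorted-list
theorem grouping_equiv {α : Type} (keyf tf : α → String) (logs : List α) :
    ((logs.foldl (fun d x => d.modify (keyf x) [] (fun v => v ++ [x])) PySem.Dict.empty).keys.foldl
        (fun d sid => d.modify sid [] (fun v => PySem.List.sorted v tf))
        (logs.foldl (fun d x => d.modify (keyf x) [] (fun v => v ++ [x])) PySem.Dict.empty)).items
    = ((PySem.List.sorted logs tf).foldl (fun d x => d.modify (keyf x) [] (fun v => v ++ [x]))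
        ((PySem.List.dedup (logs.map keyf)).foldl (fun d sid => d.insert sid []) PySem.Dict.empty)).items := by
  set K := PySem.Set.ofList (logs.map keyf) with hKdef
  have hnodupK : K.Nodup := PySem.Set.nodup_ofList _
  set d1 := logs.foldl (fun d x => d.modify (keyf x) [] (fun v => v ++ [x])) PySem.Dict.empty with hd1
  -- A side
  have hkeys1 : d1.keys = K := by
    have h := PySem.Dict.keys_foldl_modify_key logs keyf [] (fun _ x v => v ++ [x]) PySem.Dict.empty
    rw [hd1]
    rw [show (logs.foldl (fun d x => d.modify (keyf x) [] (fun v => v ++ [x])) PySem.Dict.empty)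
        = (logs.foldl (fun d x => d.modify (keyf x) [] ((fun (_ : PySem.Dict String (List α)) x v => v ++ [x]) d x)) PySem.Dict.empty) from rfl, h]
    rw [hKdef, PySem.Set.ofList_eq_foldl, PySem.Set.update_eq_foldl]
    rfl
  set d2 := d1.keys.foldl (fun d sid => d.modify sid [] (fun v => PySem.List.sorted v tf)) d1 with hd2
  have hkeys2 : d2.keys = K := by
    have h := PySem.Dict.keys_foldl_modify_key d1.keys (fun s => s) []
      (fun _ _ v => PySem.List.sorted v tf) d1
    rw [hd2]
    rw [show (d1.keys.foldl (fun d sid => d.modify sid [] (fun v => PySem.List.sorted v tf)) d1)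
        = (d1.keys.foldl (fun d x => d.modify ((fun s => s) x) [] ((fun (_ : PySem.Dict String (List α)) (_ : String) v => PySem.List.sorted v tf) d x)) d1) from rfl, h]
    rw [List.map_id', hkeys1]
    exact set_update_of_subset K K (fun x hx => hx)
  have hgetD2 : ∀ k ∈ K, d2.getD k [] = PySem.List.sorted (logs.filter (fun x => keyf x == k)) tf := by
    intro k hk
    rw [hd2, getD_foldl_modify_once _ d1.keys (hkeys1 ▸ hnodupK) d1 k, hkeys1, if_pos hk,
      hd1, getD_group]
    simp
  -- B side
  set d0 := (PySem.List.dedup (logs.map keyf)).foldl (fun d sid => d.insert sid []) PySem.Dict.empty with hd0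
  have hitems0 : d0.items = K.map (fun k => (k, ([] : List α))) := by
    rw [hd0, PySem.List.dedup_eq_ofList, ← hKdef]
    have h := PySem.Dict.items_foldl_insert_fresh K (fun s => s) (fun _ => ([] : List α))
      PySem.Dict.empty (fun a _ => by simp) (by simpa using hnodupK)
    simpa using h
  have hkeys0 : d0.keys = K := by
    have h := PySem.Dict.keys_foldl_insert (PySem.List.dedup (logs.map keyf))
      (fun _ _ => ([] : List α)) PySem.Dict.empty
    rw [hd0]
    rw [show ((PySem.List.dedup (logs.map keyf)).foldl (fun d sid => d.insert sid []) PySem.Dict.empty)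
        = ((PySem.List.dedup (logs.map keyf)).foldl (fun d x => d.insert x ((fun (_ : PySem.Dict String (List α)) (_ : String) => ([] : List α)) d x)) PySem.Dict.empty) from rfl, h]
    rw [PySem.List.dedup_eq_ofList, ← hKdef]
    have : PySem.Set.update (PySem.Dict.empty : PySem.Dict String (List α)).keys K = PySem.Set.ofList K := by
      rw [PySem.Set.ofList_eq_foldl, PySem.Set.update_eq_foldl]; rfl
    rw [this, PySem.Set.ofList_eq_self_of_nodup _ hnodupK]
  have hgetD0 : ∀ k, d0.getD k [] = [] := by
    intro k
    by_cases hk : k ∈ K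
    · have hmem : (k, ([] : List α)) ∈ d0.items := by
        rw [hitems0]; exact List.mem_map_of_mem hk
      have hnd : d0.keys.Nodup := hkeys0 ▸ hnodupK
      exact PySem.Dict.getD_of_mem_items d0 hmem hnd []
    · apply PySem.Dict.getD_of_not_contains
      simp [PySem.Dict.contains_eq_decide_mem_keys, hkeys0, hk]
  set dB := (PySem.List.sorted logs tf).foldl
      (fun d x => d.modify (keyf x) [] (fun v => v ++ [x])) d0 with hdB
  have hkeysB : dB.keys = K := by
    have h := PySem.Dict.keys_foldl_modify_key (PySem.List.sorted logs tf) keyf []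
      (fun _ x v => v ++ [x]) d0
    rw [hdB]
    rw [show ((PySem.List.sorted logs tf).foldl (fun d x => d.modify (keyf x) [] (fun v => v ++ [x])) d0)
        = ((PySem.List.sorted logs tf).foldl (fun d x => d.modify (keyf x) [] ((fun (_ : PySem.Dict String (List α)) x v => v ++ [x]) d x)) d0) from rfl, h]
    rw [hkeys0]
    apply set_update_of_subset
    intro x hx
    rcases List.mem_map.mp hx with ⟨l, hl, rfl⟩
    exact (PySem.Set.mem_ofList _ _).mpr
      (List.mem_map_of_mem ((PySem.List.mem_sorted logs tf false l).mp hl))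
  have hgetDB : ∀ k, dB.getD k []
      = (PySem.List.sorted logs tf).filter (fun x => keyf x == k) := by
    intro k
    rw [hdB, getD_group, hgetD0]
    simp
  -- combine
  rw [PySem.Dict.items_eq_map_keys d2 (hkeys2 ▸ hnodupK) [],
    PySem.Dict.items_eq_map_keys dB (hkeysB ▸ hnodupK) [], hkeys2, hkeysB]
  apply List.map_congr_left
  intro k hk
  rw [hgetD2 k hk, hgetDB k, filter_sorted]

theorem main_equiv (logs : List (List (String × String))) :
    group_logs_by_session logs = group_logs_by_session_alt logs :=
  grouping_equiv (fun l => pyDictGet l "session_id" "unknown")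
    (fun x => pyDictGet x "timestamp" "") logs

-- ===== VERDICT (by name: the statement is the Claim_ definition above) =====
theorem group_logs_by_session_spec : Claim_equal_group_logs_by_session := by
  intro logs _
  unfold Spec_group_logs_by_session
  exact main_equiv logs
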